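-- pv_equiv track=rewrite | github.com/joshroybal/Python-Constraint-Satisfaction-Programming | early_risers.py | all_distinct
-- ===== SOURCE A (Python) =====
-- from typing import List, Dict, Optional, Tuple, Union
--
-- def all_distinct(d: Dict[int, Tuple[str, str, str]]) -> bool:
--     checked: List[Tuple[str, str, str]] = []
--     for key in d:
--         for t in checked:
--             for item in d[key]:
--                 if item in t:
--                     return False
--         checked.append(d[key])
--     return True
-- ===== SOURCE B (Python) =====
-- def all_distinct(d):
--     counts = {}
--     for key in d:
--         for item in set(d[key]):
--             counts[item] = counts.get(item, 0) + 1
--     return all(c <= 1 for c in counts.values())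
-- ===== Notes on version B (the rewrite author's own statement) =====
-- stated objective: alternative
-- what changed: A scans all previously checked tuples for each new tuple; B makes one pass building a frequency table of per-tuple-deduplicated items and then checks every count is at most 1.
import Mathlib
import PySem

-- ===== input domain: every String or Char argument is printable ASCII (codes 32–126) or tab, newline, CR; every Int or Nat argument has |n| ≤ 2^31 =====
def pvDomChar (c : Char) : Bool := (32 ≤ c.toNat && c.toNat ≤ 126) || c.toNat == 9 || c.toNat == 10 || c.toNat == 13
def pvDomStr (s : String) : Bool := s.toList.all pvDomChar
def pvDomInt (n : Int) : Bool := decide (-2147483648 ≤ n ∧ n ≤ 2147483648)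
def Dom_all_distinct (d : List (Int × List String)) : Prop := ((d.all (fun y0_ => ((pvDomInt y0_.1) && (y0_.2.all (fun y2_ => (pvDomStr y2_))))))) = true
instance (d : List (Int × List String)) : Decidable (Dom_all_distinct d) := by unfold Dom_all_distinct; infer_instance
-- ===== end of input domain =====

-- B replaces A's scan of all previously-checked tuples by one frequency table built over the
-- per-tuple-deduplicated items, then checks every count is ≤ 1 (objective: alternative decomposition).

-- ===== PORT A =====
-- 'for key in d: for t in checked: for item in d[key]: if item in t: return False; checked.append(d[key])'
def adGo (dd : PySem.Dict Int (List String)) : List Int → List (List String) → Bool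
  | [], _ => true
  | k :: ks, checked =>
    if checked.any (fun t => (dd.getD k []).any (fun item => t.contains item)) then false
    else adGo dd ks (checked ++ [dd.getD k []])

def all_distinct (d : List (Int × List String)) : Bool :=
  let dd := PySem.Dict.ofList d
  adGo dd dd.keys []

-- ===== PORT B =====
-- 'for item in set(d[key]): counts[item] = counts.get(item, 0) + 1'
def altStep (c : PySem.Dict String Int) (v : List String) : PySem.Dict String Int :=
  (PySem.Set.ofList v).foldl (fun c item => c.insert item (c.getD item 0 + 1)) c

def all_distinct_alt (d : List (Int × List String)) : Bool :=
  let dd := PySem.Dict.ofList d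
  let counts := dd.keys.foldl (fun c k => altStep c (dd.getD k [])) PySem.Dict.empty
  counts.values.all (fun c => decide (c ≤ 1))

-- ===== PRECONDITION & SPEC =====
def Spec_all_distinct (d : List (Int × List String)) (out : Bool) : Prop := out = all_distinct_alt d
instance (d : List (Int × List String)) (out : Bool) : Decidable (Spec_all_distinct d out) := by unfold Spec_all_distinct; infer_instance

-- ===== CLAIM (what is proved, stated in full; the proofs are below) =====
def Claim_equal_all_distinct : Prop := ∀ (d : List (Int × List String)), Dom_all_distinct d → Spec_all_distinct d (all_distinct d)

-- ===== LEMMAS AND PROOFS =====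

-- A's loop, abstracted to the list of value-tuples it actually visits
def goVals : List (List String) → List (List String) → Bool
  | [], _ => true
  | v :: vs, checked =>
    if checked.any (fun t => v.any (fun item => t.contains item)) then false
    else goVals vs (checked ++ [v])

theorem adGo_eq_goVals (dd : PySem.Dict Int (List String)) (ks : List Int)
    (checked : List (List String)) :
    adGo dd ks checked = goVals (ks.map (fun k => dd.getD k [])) checked := by
  induction ks generalizing checked with
  | nil => rfl
  | cons k ks ih => simp only [adGo, List.map, goVals]; split <;> simp [ih]

theorem goVals_true_iff (vs checked : List (List String)) :
    goVals vs checked = true ↔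
      ((∀ v ∈ vs, ∀ t ∈ checked, ∀ x ∈ v, x ∉ t) ∧
        vs.Pairwise (fun a b => ∀ x ∈ b, x ∉ a)) := by
  induction vs generalizing checked with
  | nil => simp [goVals]
  | cons v vs ih =>
    simp only [goVals]
    by_cases h : checked.any (fun t => v.any (fun item => t.contains item)) = true
    · simp only [if_pos h]
      simp only [List.any_eq_true, List.contains_iff_mem] at h
      obtain ⟨t, ht, x, hx, hxt⟩ := h
      simp only [Bool.false_eq_true, false_iff, not_and]
      intro h1 _
      exact h1 v (List.mem_cons_self) t ht x hx hxt
    · simp only [if_neg h]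
      rw [ih]
      simp only [List.any_eq_true, List.contains_iff_mem, not_exists, not_and] at h
      simp only [List.mem_cons, List.mem_append, List.not_mem_nil, or_false, List.pairwise_cons]
      constructor
      · rintro ⟨h1, h2⟩
        refine ⟨?_, ?_, h2⟩
        · rintro w (rfl | hw) t ht x hx hxt
          · exact h t ht x hx hxt
          · exact h1 w hw t (Or.inl ht) x hx hxt
        · intro b hb x hx hxv
          exact h1 b hb v (Or.inr rfl) x hx hxv -- t = v case
      · rintro ⟨h1, h2, h3⟩
        refine ⟨?_, h3⟩
        rintro w hw t (ht | rfl) x hx hxt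
        · exact h1 w (Or.inr hw) t ht x hx hxt
        · exact h2 w hw x hx hxt

theorem flat_count (vs : List (List String)) (c0 : PySem.Dict String Int) (x : String) :
    (vs.foldl altStep c0).getD x 0
      = c0.getD x 0 + ((vs.flatMap PySem.Set.ofList).count x : Int) := by
  induction vs generalizing c0 with
  | nil => simp
  | cons v vs ih =>
    simp only [List.foldl, List.flatMap_cons, List.count_append]
    rw [ih, altStep, PySem.Dict.getD_foldl_insert_add_one]
    push_cast
    ring

theorem keys_nodup_fold (vs : List (List String)) (c0 : PySem.Dict String Int)
    (h : c0.keys.Nodup) : (vs.foldl altStep c0).keys.Nodup := by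
  induction vs generalizing c0 with
  | nil => exact h
  | cons v vs ih =>
    exact ih _ (PySem.Dict.nodup_keys_foldl_insert _ _ _ h)

theorem mem_keys_fold (vs : List (List String)) (c0 : PySem.Dict String Int) (x : String) :
    x ∈ (vs.foldl altStep c0).keys ↔ x ∈ c0.keys ∨ x ∈ vs.flatMap PySem.Set.ofList := by
  induction vs generalizing c0 with
  | nil => simp
  | cons v vs ih =>
    simp only [List.foldl, List.flatMap_cons, List.mem_append]
    rw [ih, altStep, PySem.Dict.keys_foldl_insert, PySem.Set.mem_update]
    tauto

-- ===== VERDICT (by name: the statement is the Claim_ definition above) =====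
theorem pairwise_iff_flat_nodup (vs : List (List String)) :
    vs.Pairwise (fun a b => ∀ x ∈ b, x ∉ a) ↔ (vs.flatMap PySem.Set.ofList).Nodup := by
  rw [List.nodup_flatMap]
  constructor
  · intro h
    refine ⟨fun v _ => PySem.Set.nodup_ofList v, ?_⟩
    refine h.imp ?_
    intro a b hab x hxa hxb
    rw [PySem.Set.mem_ofList] at hxa hxb
    exact hab x hxb hxa
  · rintro ⟨_, h⟩
    refine h.imp ?_
    intro a b hab x hxb hxa
    exact hab (by rw [PySem.Set.mem_ofList]; exact hxa) (by rw [PySem.Set.mem_ofList]; exact hxb)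

theorem alt_true_iff (vs : List (List String)) :
    ((vs.foldl altStep PySem.Dict.empty).values.all (fun c => decide (c ≤ 1))) = true ↔
      (vs.flatMap PySem.Set.ofList).Nodup := by
  have hnd : (vs.foldl altStep PySem.Dict.empty).keys.Nodup :=
    keys_nodup_fold vs _ (by simp [PySem.Dict.keys_empty])
  rw [PySem.Dict.values_eq_map_keys _ hnd 0]
  simp only [List.all_eq_true, List.forall_mem_map, decide_eq_true_eq]
  constructor
  · intro h
    rw [List.nodup_iff_count_le_one]
    intro x
    by_cases hx : x ∈ vs.flatMap PySem.Set.ofList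
    · have hk : x ∈ (vs.foldl altStep PySem.Dict.empty).keys := by
        rw [mem_keys_fold]; simp [PySem.Dict.keys_empty, hx]
      have := h x hk
      rw [flat_count, PySem.Dict.getD_empty] at this
      omega
    · simp [List.count_eq_zero_of_not_mem hx]
  · intro h x _
    rw [flat_count, PySem.Dict.getD_empty]
    rw [List.nodup_iff_count_le_one] at h
    have := h x
    omega

theorem all_distinct_spec : Claim_equal_all_distinct := by
  intro d _
  show all_distinct d = all_distinct_alt d
  show adGo (PySem.Dict.ofList d) (PySem.Dict.ofList d).keys []
      = ((PySem.Dict.ofList d).keys.foldl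
          (fun c k => altStep c ((PySem.Dict.ofList d).getD k [])) PySem.Dict.empty).values.all
          (fun c => decide (c ≤ 1))
  rw [adGo_eq_goVals, ← List.foldl_map]
  set vs := (PySem.Dict.ofList d).keys.map (fun k => (PySem.Dict.ofList d).getD k []) with hvs
  have hA : goVals vs [] = true ↔ (vs.flatMap PySem.Set.ofList).Nodup := by
    rw [goVals_true_iff, ← pairwise_iff_flat_nodup]
    simp
  have hB := alt_true_iff vs
  rw [Bool.eq_iff_iff, hA, hB]
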